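-- pv_equiv track=rewrite | github.com/JZhouSaclay/ProjectDL | Transformer_Simple/app.py | tokens_to_clean_str
-- ===== SOURCE A (Python) =====
-- def tokens_to_clean_str(indices, idx2token):
--     """
--     Convert a list of token indices into a cleaned string.
--
--     This function:
--       - Converts indices to tokens using idx2token.
--       - Trims everything after the first <EOS>.
--       - Removes <SOS> if it appears at the start.
--       - Removes any <PAD> tokens.
--     """
--     tokens = [idx2token[idx] for idx in indices]
--     # Find first <EOS>
--     try:
--         eos_idx = tokens.index("<EOS>")
--     except ValueError:
--         eos_idx = len(tokens)
--     # Skip leading <SOS>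
--     start_idx = 0
--     if tokens and tokens[0] == "<SOS>":
--         start_idx = 1
--     # Slice up to <EOS>
--     trimmed_tokens = tokens[start_idx:eos_idx]
--     # Remove <PAD> from the middle
--     trimmed_tokens = [t for t in trimmed_tokens if t != "<PAD>"]
--     return "".join(trimmed_tokens)
-- ===== SOURCE B (Python) =====
-- def tokens_to_clean_str(indices, idx2token):
--     # Single pass: materialize tokens (so lookups raise exactly as in A),
--     # then one loop that skips a leading <SOS>, breaks at <EOS>, drops <PAD>.
--     tokens = [idx2token[idx] for idx in indices]
--     result = []
--     for i, token in enumerate(tokens):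
--         if i == 0 and token == "<SOS>":
--             continue
--         if token == "<EOS>":
--             break
--         if token == "<PAD>":
--             continue
--         result.append(token)
--     return "".join(result)
-- ===== Notes on version B (the rewrite author's own statement) =====
-- stated objective: simpler
-- what changed: A's three separate passes (find first <EOS> with index(), slice, then a <PAD>-filtering comprehension) are collapsed into one enumerate loop with an early break that skips a leading <SOS>, drops <PAD>s and stops at the first <EOS>.
import Mathlib
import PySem

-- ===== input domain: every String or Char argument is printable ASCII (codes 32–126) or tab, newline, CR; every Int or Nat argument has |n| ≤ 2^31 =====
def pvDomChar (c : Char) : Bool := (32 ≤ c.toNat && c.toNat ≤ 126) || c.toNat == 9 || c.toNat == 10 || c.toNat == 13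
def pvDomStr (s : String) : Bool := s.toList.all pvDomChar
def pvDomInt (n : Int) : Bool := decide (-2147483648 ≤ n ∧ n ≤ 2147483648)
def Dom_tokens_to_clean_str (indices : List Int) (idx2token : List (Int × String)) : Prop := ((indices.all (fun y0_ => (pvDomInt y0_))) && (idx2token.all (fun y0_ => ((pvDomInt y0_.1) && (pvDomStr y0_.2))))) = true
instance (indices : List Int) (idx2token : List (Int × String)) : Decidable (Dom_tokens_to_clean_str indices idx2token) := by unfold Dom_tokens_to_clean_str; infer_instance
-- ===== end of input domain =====

-- B collapses A's three passes (index() for <EOS>, slice, <PAD>-filter comprehension)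
-- into one enumerate loop with an early break; objective: simpler. Same return values.

-- ===== PORT A =====
def tokens_to_clean_str (indices : List Int) (idx2token : List (Int × String)) : String :=
  -- tokens = [idx2token[idx] for idx in indices]  (dict lookup; Pre_ guarantees the key exists)
  let tokens : List String := indices.map (fun idx => ((PySem.Dict.ofList idx2token).get? idx).getD "")
  -- eos_idx = tokens.index("<EOS>") with ValueError fallback len(tokens)
  let eosIdx : Nat := (PySem.List.index? tokens "<EOS>").getD tokens.length
  -- start_idx = 1 if tokens and tokens[0] == "<SOS>" else 0
  let startIdx : Nat := if tokens.head? == some "<SOS>" then 1 else 0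
  -- trimmed = tokens[start_idx:eos_idx]
  let trimmed := PySem.List.slice tokens (some (startIdx : Int)) (some (eosIdx : Int))
  -- [t for t in trimmed if t != "<PAD>"] then "".join(...)
  PySem.Str.join "" (trimmed.filter (fun t => t != "<PAD>"))

-- ===== PORT B =====
-- the enumerate loop of Source B: i is the running index, acc the result list
def tokensGoB (ts : List String) (i : Nat) (acc : List String) : List String :=
  match ts with
  | [] => acc
  | t :: rest =>
    if i == 0 && t == "<SOS>" then tokensGoB rest (i + 1) acc
    else if t == "<EOS>" then acc
    else if t == "<PAD>" then tokensGoB rest (i + 1) acc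
    else tokensGoB rest (i + 1) (acc ++ [t])

def tokens_to_clean_str_alt (indices : List Int) (idx2token : List (Int × String)) : String :=
  let tokens : List String := indices.map (fun idx => ((PySem.Dict.ofList idx2token).get? idx).getD "")
  PySem.Str.join "" (tokensGoB tokens 0 [])

-- ===== PRECONDITION & SPEC =====
-- Pre_ excludes exactly the inputs where some index is not a key of idx2token: there
-- the dict lookup raises KeyError in both A and B.
def Pre_tokens_to_clean_str (indices : List Int) (idx2token : List (Int × String)) : Prop :=
  ∀ i ∈ indices, i ∈ idx2token.map Prod.fst
instance (indices : List Int) (idx2token : List (Int × String)) : Decidable (Pre_tokens_to_clean_str indices idx2token) := by unfold Pre_tokens_to_clean_str; infer_instance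
def pvWitness_tokens_to_clean_str : List Int × (List (Int × String)) :=
  ([0, 2, 1, 3], [(0, "<SOS>"), (1, "<EOS>"), (2, "hi"), (3, "<PAD>")])
def Spec_tokens_to_clean_str (indices : List Int) (idx2token : List (Int × String)) (out : String) : Prop := out = tokens_to_clean_str_alt indices idx2token
instance (indices : List Int) (idx2token : List (Int × String)) (out : String) : Decidable (Spec_tokens_to_clean_str indices idx2token out) := by unfold Spec_tokens_to_clean_str; infer_instance

-- ===== CLAIM (what is proved, stated in full; the proofs are below) =====
def Claim_equal_tokens_to_clean_str : Prop := ∀ (indices : List Int) (idx2token : List (Int × String)), Dom_tokens_to_clean_str indices idx2token → Pre_tokens_to_clean_str indices idx2token → Spec_tokens_to_clean_str indices idx2token (tokens_to_clean_str indices idx2token)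

-- ===== LEMMAS AND PROOFS =====

-- take up to the first occurrence of v (length if absent) is takeWhile (· ≠ v)
theorem take_indexGetD_eq_takeWhile (ts : List String) (v : String) :
    ts.take ((PySem.List.index? ts v).getD ts.length) = ts.takeWhile (fun t => t != v) := by
  induction ts with
  | nil => simp
  | cons t rest ih =>
    by_cases h : t = v
    · subst h
      rw [PySem.List.index?_cons_self]
      simp
    · rw [PySem.List.index?_cons_of_ne rest h]
      cases hk : PySem.List.index? rest v with
      | none =>
        rw [hk] at ih
        simp [h, ← ih]
      | some k =>
        rw [hk] at ih
        simp [h, ← ih]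

-- once past index 0, the loop is filter ∘ takeWhile, appended to acc
theorem tokensGoB_succ (ts : List String) (n : Nat) (acc : List String) :
    tokensGoB ts (n + 1) acc =
      acc ++ (ts.takeWhile (fun t => t != "<EOS>")).filter (fun t => t != "<PAD>") := by
  induction ts generalizing n acc with
  | nil => simp [tokensGoB]
  | cons t rest ih =>
    by_cases he : t = "<EOS>"
    · simp [tokensGoB, he]
    · by_cases hp : t = "<PAD>"
      · simp [tokensGoB, hp, ih]
      · simp [tokensGoB, he, hp, ih]

theorem tokens_to_clean_str_spec : Claim_equal_tokens_to_clean_str := by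
  intro indices idx2token _ _
  unfold Spec_tokens_to_clean_str tokens_to_clean_str tokens_to_clean_str_alt
  dsimp only
  generalize (indices.map (fun idx => ((PySem.Dict.ofList idx2token).get? idx).getD "")) = tokens
  rw [PySem.List.slice_natCast]
  congr 1
  cases tokens with
  | nil => simp [tokensGoB]
  | cons t rest =>
    by_cases hs : t = "<SOS>"
    · -- leading <SOS>: A slices from 1, B skips it at i = 0
      subst hs
      have hne : ("<SOS>" : String) ≠ "<EOS>" := by decide
      rw [PySem.List.index?_cons_of_ne rest hne]
      have hstart : (if (("<SOS>" :: rest).head? == some "<SOS>") = true then (1:Nat) else 0) = 1 := by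
        simp
      rw [hstart, List.drop_succ_cons, List.drop_zero]
      have htw := take_indexGetD_eq_takeWhile rest "<EOS>"
      rw [tokensGoB, if_pos (by decide), tokensGoB_succ, List.nil_append, ← htw]
      cases hk : PySem.List.index? rest "<EOS>" with
      | none => simp
      | some k => simp
    · -- no leading <SOS>: A slices from 0, B's first step behaves like the generic step
      have hstart : (if ((t :: rest).head? == some "<SOS>") = true then (1:Nat) else 0) = 0 := by
        simp [hs]
      rw [hstart, List.drop_zero, Nat.sub_zero,
          take_indexGetD_eq_takeWhile (t :: rest) "<EOS>"]
      by_cases he : t = "<EOS>"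
      · simp [tokensGoB, he]
      · by_cases hp : t = "<PAD>"
        · rw [tokensGoB, if_neg (by simp [hs]), if_neg (by simp [he]), if_pos (by simp [hp]),
              tokensGoB_succ, List.nil_append]
          simp [hp]
        · rw [tokensGoB, if_neg (by simp [hs]), if_neg (by simp [he]), if_neg (by simp [hp]),
              tokensGoB_succ]
          simp [he, hp]
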